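-- pv_equiv track=rewrite | github.com/mabergerx/codesignal | arcade/eruptionOfLight/isBeautifulString.py | solution
-- ===== SOURCE A (Python) =====
-- from collections import Counter
--
-- def solution(inputString):
--     c = sorted(Counter(inputString).most_common())
--     for index, (letter, count) in enumerate(c):
--         try:
--             if count < c[index+1][1]:
--                 return False
--         except IndexError:
--             pass
--     return True
-- ===== SOURCE B (Python) =====
-- from collections import Counter
--
-- def solution(inputString):
--     counts = [cnt for _, cnt in sorted(Counter(inputString).items())]
--     return counts == sorted(counts, reverse=True)
-- ===== Notes on version B (the rewrite author's own statement) =====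
-- stated objective: simpler
-- what changed: Replaces A's index-based adjacent-pair loop with its try/except IndexError guard by building the count list in letter order and comparing it for equality with its descending-sorted copy.
import Mathlib
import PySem

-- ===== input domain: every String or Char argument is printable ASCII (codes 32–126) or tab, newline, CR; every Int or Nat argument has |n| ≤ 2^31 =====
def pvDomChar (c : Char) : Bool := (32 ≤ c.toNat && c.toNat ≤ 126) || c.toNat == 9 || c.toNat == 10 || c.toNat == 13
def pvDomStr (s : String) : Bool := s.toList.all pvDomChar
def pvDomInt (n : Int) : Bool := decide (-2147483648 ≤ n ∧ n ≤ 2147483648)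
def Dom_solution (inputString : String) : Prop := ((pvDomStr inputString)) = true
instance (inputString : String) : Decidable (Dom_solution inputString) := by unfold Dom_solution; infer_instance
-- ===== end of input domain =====

-- B replaces A's index-based adjacent-pair loop (with its try/except IndexError) by
-- comparing the letter-ordered count list with its descending-sorted copy: simpler.

-- ===== PORT A =====
-- the for-loop over enumerate(c): body looks up c[index+1]; IndexError → pass
def loopA (c : List (Char × Int)) : List (Int × (Char × Int)) → Bool
  | [] => true
  | (index, (_letter, count)) :: rest =>
    match PySem.List.pyGet? c (index + 1) with
    | some nxt => if count < nxt.2 then false else loopA c rest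
    | none => loopA c rest

def solution (inputString : String) : Bool :=
  -- c = sorted(Counter(inputString).most_common()); most_common() = sorted by count descending (stable)
  let c := PySem.List.sorted2
    (PySem.List.sorted ((PySem.Dict.counter inputString.toList).items) (·.2) true)
    (·.1) (·.2) false
  loopA c (PySem.List.enumerate c 0)

-- ===== PORT B =====
def solution_alt (inputString : String) : Bool :=
  let counts := (PySem.List.sorted2 ((PySem.Dict.counter inputString.toList).items)
    (·.1) (·.2) false).map (·.2)
  counts == PySem.List.sorted counts (fun x => x) true

-- ===== PRECONDITION & SPEC =====
def Spec_solution (inputString : String) (out : Bool) : Prop := out = solution_alt inputString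
instance (inputString : String) (out : Bool) : Decidable (Spec_solution inputString out) := by unfold Spec_solution; infer_instance

-- ===== CLAIM (what is proved, stated in full; the proofs are below) =====
def Claim_equal_solution : Prop := ∀ (inputString : String), Dom_solution inputString → Spec_solution inputString (solution inputString)

-- ===== LEMMAS AND PROOFS =====

-- insertBy with two comparators that agree on all pairs drawn from S
theorem insertBy_congr {α : Type} (f g : α → α → Bool) (S : List α)
    (h : ∀ a ∈ S, ∀ b ∈ S, f a b = g a b) (x : α) (hx : x ∈ S) :
    ∀ (acc : List α), (∀ a ∈ acc, a ∈ S) →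
      PySem.List.insertBy f x acc = PySem.List.insertBy g x acc := by
  intro acc
  induction acc with
  | nil => intro _; simp [PySem.List.insertBy]
  | cons y t ih =>
    intro hacc
    have hy : y ∈ S := hacc y (by simp)
    have ht : ∀ a ∈ t, a ∈ S := fun a ha => hacc a (by simp [ha])
    simp only [PySem.List.insertBy, h x hx y hy]
    by_cases hb : g x y = true
    · simp [hb]
    · simp [hb, ih ht]

theorem foldl_insertBy_congr {α : Type} (f g : α → α → Bool) (S : List α)
    (h : ∀ a ∈ S, ∀ b ∈ S, f a b = g a b) :
    ∀ (xs acc : List α), (∀ a ∈ xs, a ∈ S) → (∀ a ∈ acc, a ∈ S) →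
      xs.foldl (fun acc x => PySem.List.insertBy f x acc) acc =
      xs.foldl (fun acc x => PySem.List.insertBy g x acc) acc := by
  intro xs
  induction xs with
  | nil => intro acc _ _; rfl
  | cons x t ih =>
    intro acc hxs hacc
    have hx : x ∈ S := hxs x (by simp)
    have ht : ∀ a ∈ t, a ∈ S := fun a ha => hxs a (by simp [ha])
    have hacc' : ∀ a ∈ PySem.List.insertBy g x acc, a ∈ S := by
      intro a ha
      rcases (PySem.List.mem_insertBy g x a acc).1 ha with rfl | ha
      · exact hx
      · exact hacc a ha
    simp only [List.foldl_cons, insertBy_congr f g S h x hx acc hacc]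
    exact ih _ ht hacc'

-- tuple sort = sort by first component, when the first components are all distinct
theorem sorted2_eq_sorted_fst (xs : List (Char × Int))
    (hnd : (xs.map Prod.fst).Nodup) :
    PySem.List.sorted2 xs (·.1) (·.2) false = PySem.List.sorted xs (·.1) false := by
  have h : ∀ a ∈ xs, ∀ b ∈ xs,
      (fun a b : Char × Int => decide (a.1 < b.1) || (!decide (b.1 < a.1) && decide (a.2 < b.2))) a b
      = (fun a b : Char × Int => decide (a.1 < b.1)) a b := by
    intro a ha b hb
    rcases lt_trichotomy a.1 b.1 with hlt | heq | hgt
    · simp [hlt]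
    · have : a = b := List.inj_on_of_nodup_map hnd ha hb heq
      subst this; simp
    · simp [hgt, not_lt_of_gt hgt]
  exact foldl_insertBy_congr _ _ xs h xs [] (fun a ha => ha) (by simp)

-- one unfolding step of A's loop
theorem loopA_cons_some (c : List (Char × Int)) (i : Int) (p : Char × Int)
    (rest : List (Int × (Char × Int))) (nxt : Char × Int)
    (h : PySem.List.pyGet? c (i + 1) = some nxt) :
    loopA c ((i, p) :: rest) = if p.2 < nxt.2 then false else loopA c rest := by
  simp [loopA, h]

theorem loopA_cons_none (c : List (Char × Int)) (i : Int) (p : Char × Int)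
    (rest : List (Int × (Char × Int)))
    (h : PySem.List.pyGet? c (i + 1) = none) :
    loopA c ((i, p) :: rest) = loopA c rest := by
  simp [loopA, h]

-- A's loop over a suffix of c: true iff every realized adjacent pair is non-increasing
theorem loopA_drop (c : List (Char × Int)) :
    ∀ (s : Nat),
      loopA c (PySem.List.enumerate (c.drop s) s) = true ↔
      ∀ (j : Nat), s ≤ j → ∀ (h : j + 1 < c.length),
        (c.get ⟨j + 1, h⟩).2 ≤ (c.get ⟨j, by omega⟩).2 := by
  intro s
  induction hn : c.length - s using Nat.strong_induction_on generalizing s with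
  | _ n ih =>
  by_cases hs : s < c.length
  · have hdrop : List.drop s c = c.get ⟨s, hs⟩ :: List.drop (s + 1) c :=
      (List.getElem_cons_drop hs).symm
    have hrec := ih (c.length - (s + 1)) (by omega) (s + 1) rfl
    rw [hdrop, PySem.List.enumerate_cons]
    have hcast : (s : Int) + 1 = ((s + 1 : Nat) : Int) := by push_cast; ring
    by_cases hs1 : s + 1 < c.length
    · have hget : PySem.List.pyGet? c ((s : Int) + 1) = some (c.get ⟨s + 1, hs1⟩) := by
        rw [hcast, PySem.List.pyGet?_natCast, List.getElem?_eq_getElem hs1,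
          List.get_eq_getElem]
      rw [loopA_cons_some c _ _ _ _ hget, hcast]
      by_cases hlt : (c.get ⟨s, hs⟩).2 < (c.get ⟨s + 1, hs1⟩).2
      · rw [if_pos hlt]
        constructor
        · intro hfalse; exact absurd hfalse (by simp)
        · intro hall
          exact absurd (hall s (le_refl s) hs1) (not_le_of_gt hlt)
      · rw [if_neg hlt]
        rw [hrec]
        constructor
        · intro hall j hj hj1
          rcases Nat.eq_or_lt_of_le hj with rfl | hj'
          · exact le_of_not_gt hlt
          · exact hall j (by omega) hj1
        · intro hall j hj hj1
          exact hall j (by omega) hj1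
    · have hget : PySem.List.pyGet? c ((s : Int) + 1) = none := by
        rw [hcast, PySem.List.pyGet?_natCast, List.getElem?_eq_none (by omega)]
      rw [loopA_cons_none c _ _ _ hget, hcast]
      rw [hrec]
      constructor
      · intro hall j hj hj1
        rcases Nat.eq_or_lt_of_le hj with rfl | hj'
        · omega
        · exact hall j (by omega) hj1
      · intro hall j hj hj1
        exact hall j (by omega) hj1
  · rw [List.drop_eq_nil_of_le (by omega), PySem.List.enumerate_nil]
    simp only [loopA]
    constructor
    · intro _ j hj hj1; omega
    · intro _; trivial

-- pairwise non-increasing ↔ adjacent non-increasing (for Int, by transitivity)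
theorem pairwise_ge_iff_adjacent (l : List Int) :
    l.Pairwise (fun a b => b ≤ a) ↔
    ∀ (i : Nat), ∀ (h : i + 1 < l.length), l.get ⟨i + 1, h⟩ ≤ l.get ⟨i, by omega⟩ := by
  constructor
  · intro hp i hi
    exact (List.pairwise_iff_get.1 hp) ⟨i, by omega⟩ ⟨i + 1, hi⟩ (by simp)
  · intro hadj
    rw [List.pairwise_iff_get]
    intro a b hab
    have key : ∀ (d : Nat), ∀ (i : Nat), ∀ (h : i + d + 1 < l.length),
        l.get ⟨i + d + 1, h⟩ ≤ l.get ⟨i, by omega⟩ := by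
      intro d
      induction d with
      | zero => intro i h; exact hadj i h
      | succ d ihd =>
        intro i h
        have h1 : i + d + 1 < l.length := by omega
        have hstep := hadj (i + d + 1) (by omega : i + d + 1 + 1 < l.length)
        have h2 : l.get ⟨i + (d + 1) + 1, h⟩ = l.get ⟨i + d + 1 + 1, by omega⟩ := rfl
        rw [h2]
        exact le_trans hstep (ihd i h1)
    have hb : b = ⟨(a : Nat) + ((b : Nat) - (a : Nat) - 1) + 1, by omega⟩ := by
      apply Fin.ext; simp; omega
    rw [hb]
    exact key ((b : Nat) - (a : Nat) - 1) a (by omega)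

-- the canonical letter-ordered count list
def canonL (chars : List Char) : List (Char × Int) :=
  (PySem.List.sorted (PySem.Set.ofList chars) (fun x => x) false).map
    (fun k => (k, (chars.count k : Int)))

theorem canonL_perm_items (chars : List Char) :
    (canonL chars).Perm ((PySem.Dict.counter chars).items) := by
  rw [PySem.Dict.items_counter]
  exact (PySem.List.sorted_perm _ _ _).map _

theorem canonL_pairwise (chars : List Char) :
    (canonL chars).Pairwise (fun a b => a.1 < b.1) := by
  exact (PySem.List.sorted_ofList_pairwise_lt chars).map _ (by intro a b h; exact h)

theorem sorted_fst_eq_canonL (chars : List Char) (xs : List (Char × Int))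
    (hperm : (canonL chars).Perm xs) :
    PySem.List.sorted xs (·.1) false = canonL chars :=
  PySem.List.sorted_eq_of_perm_of_pairwise_lt xs (canonL chars) _ hperm (canonL_pairwise chars)

theorem nodup_fst_of_perm_items (chars : List Char) (xs : List (Char × Int))
    (hperm : xs.Perm ((PySem.Dict.counter chars).items)) :
    (xs.map Prod.fst).Nodup := by
  have h2 : (((PySem.Dict.counter chars).items).map Prod.fst).Nodup := by
    rw [PySem.Dict.items_counter, List.map_map]
    have hid : (Prod.fst ∘ fun k : Char => (k, ((chars.count k : Nat) : Int))) = fun k => k := rfl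
    rw [hid, List.map_id']
    exact PySem.Set.nodup_ofList chars
  exact (hperm.map Prod.fst).nodup_iff.2 h2

-- A computes loopA over the canonical list
theorem solution_eq_canon (s : String) :
    solution s = loopA (canonL s.toList) (PySem.List.enumerate (canonL s.toList) 0) := by
  unfold solution
  have hperm : (PySem.List.sorted ((PySem.Dict.counter s.toList).items) (·.2) true).Perm
      ((PySem.Dict.counter s.toList).items) := PySem.List.sorted_perm _ _ _
  rw [sorted2_eq_sorted_fst _ (nodup_fst_of_perm_items s.toList _ hperm),
    sorted_fst_eq_canonL s.toList _ ((canonL_perm_items s.toList).trans hperm.symm)]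

-- B computes the sorted-copy comparison over the canonical list
theorem solution_alt_eq_canon (s : String) :
    solution_alt s =
      (((canonL s.toList).map (·.2)) ==
        PySem.List.sorted ((canonL s.toList).map (·.2)) (fun x => x) true) := by
  unfold solution_alt
  rw [sorted2_eq_sorted_fst _ (nodup_fst_of_perm_items s.toList _ (List.Perm.refl _)),
    sorted_fst_eq_canonL s.toList _ (canonL_perm_items s.toList)]

-- ===== VERDICT (by name: the statement is the Claim_ definition above) =====
theorem solution_spec : Claim_equal_solution := by
  unfold Claim_equal_solution Spec_solution
  intro s _
  rw [solution_eq_canon, solution_alt_eq_canon]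
  set L := canonL s.toList with hL
  set counts := L.map (·.2) with hcounts
  have hlen : counts.length = L.length := by simp [hcounts]
  have hadjL : (∀ (j : Nat), 0 ≤ j → ∀ (h : j + 1 < L.length),
        (L.get ⟨j + 1, h⟩).2 ≤ (L.get ⟨j, by omega⟩).2) ↔
      (∀ (i : Nat), ∀ (h : i + 1 < counts.length),
        counts.get ⟨i + 1, h⟩ ≤ counts.get ⟨i, by omega⟩) := by
    simp only [List.get_eq_getElem]
    constructor
    · intro hall i hi
      have hi' : i + 1 < L.length := by omega
      simp only [hcounts, List.getElem_map]
      exact hall i (by omega) hi'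
    · intro hall j _ hj
      have hj' : j + 1 < counts.length := by omega
      have := hall j hj'
      simpa [hcounts] using this
  by_cases hb : counts.Pairwise (fun a b => b ≤ a)
  · have h1 : loopA L (PySem.List.enumerate L 0) = true := by
      rw [show PySem.List.enumerate L 0 = PySem.List.enumerate (L.drop 0) 0 by simp]
      exact (loopA_drop L 0).2 (fun j hj h => hadjL.2 ((pairwise_ge_iff_adjacent counts).1 hb) j hj h)
    have h2 : PySem.List.sorted counts (fun x => x) true = counts :=
      PySem.List.sorted_rev_eq_self_of_pairwise counts _ hb
    rw [h1, h2]
    simp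
  · have h1 : loopA L (PySem.List.enumerate L 0) = false := by
      rw [show PySem.List.enumerate L 0 = PySem.List.enumerate (L.drop 0) 0 by simp]
      rw [Bool.eq_false_iff]
      intro hcontra
      exact hb ((pairwise_ge_iff_adjacent counts).2
        (hadjL.1 fun j hj h => ((loopA_drop L 0).1 hcontra) j hj h))
    have h2 : counts ≠ PySem.List.sorted counts (fun x => x) true := by
      intro hcontra
      exact hb (hcontra ▸ PySem.List.sorted_pairwise_rev counts (fun x => x))
    rw [h1]
    symm
    rw [beq_eq_false_iff_ne]
    exact h2
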